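-- pv_equiv track=rewrite | github.com/hjyoon/baekjoon-answers | _1000/1895.py | solution
-- ===== SOURCE A (Python) =====
-- import itertools
--
-- def solution(R, C, a, T):
--     ans = 0
--
--     height, width = len(a), len(a[0]) # 2차원 배열의 전체 높이와 넓이
--     part_h, part_w = 3, 3 # 뽑아낼 구역의 높이와 넓이
--     tmp = []
--     for i in range(height-part_h+1):
--         tmp2 = []
--         for j in range(width-part_w+1):
--             tmp3 = []
--             for row in a[i:i+part_h]:
--                 tmp3.extend(row[j:j+part_w])
--             tmp3.sort()
--             tmp2.append(tmp3[4])
--         tmp.append(tmp2)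
--
--     for v in itertools.chain(*tmp):
--         if v >= T:
--             ans += 1
--
--     return str(ans) if type(ans) != str else ans
-- ===== SOURCE B (Python) =====
-- def solution(R, C, a, T):
--     ans = 0
--     for i in range(len(a) - 2):
--         for j in range(len(a[0]) - 2):
--             cnt = sum(1 for row in a[i:i+3] for x in row[j:j+3] if x >= T)
--             if cnt >= 5:
--                 ans += 1
--     return str(ans)
-- ===== Notes on version B (the rewrite author's own statement) =====
-- stated objective: simpler
-- what changed: Drops the median table, the per-window sort and the itertools.chain pass: since the 3x3 median (5th smallest of 9) is >= T iff at least 5 of the 9 cells are >= T, B just counts cells >= T per window in one accumulating nested loop.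
-- outside the precondition, e.g. on solution(3, 3, [[0, 0, 0], [0, 1], [1, 1, 1]], 1): A returns '1', B returns '0'
import Mathlib
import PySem

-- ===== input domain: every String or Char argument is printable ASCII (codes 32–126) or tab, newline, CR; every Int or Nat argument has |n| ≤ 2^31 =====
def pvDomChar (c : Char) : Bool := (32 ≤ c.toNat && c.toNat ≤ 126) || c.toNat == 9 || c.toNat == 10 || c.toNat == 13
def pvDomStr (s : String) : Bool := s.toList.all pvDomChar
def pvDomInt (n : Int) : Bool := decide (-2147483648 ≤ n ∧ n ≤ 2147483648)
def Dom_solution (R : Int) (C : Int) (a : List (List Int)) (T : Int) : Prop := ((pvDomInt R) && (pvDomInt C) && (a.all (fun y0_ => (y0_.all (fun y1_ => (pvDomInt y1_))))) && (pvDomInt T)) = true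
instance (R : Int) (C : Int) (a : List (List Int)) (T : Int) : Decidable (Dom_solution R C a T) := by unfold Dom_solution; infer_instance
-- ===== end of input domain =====

-- B drops the per-window sort, the median table and the chain pass: it counts cells >= T
-- per 3x3 window and adds 1 when that count is >= 5 (the 5th smallest of 9 is >= T iff
-- at least 5 of the 9 cells are) — objective: simpler, same asymptotic cost.

-- ===== PORT A =====
def solution (R : Int) (C : Int) (a : List (List Int)) (T : Int) : String :=
  let height : Int := a.length
  let width : Int := (a.headD []).length   -- len(a[0]): IndexError on a = [], excluded by Pre_
  let tmp : List (List Int) :=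
    (PySem.List.pyRange 0 (height - 3 + 1)).foldl (fun tmp i =>
      let tmp2 : List Int :=
        (PySem.List.pyRange 0 (width - 3 + 1)).foldl (fun tmp2 j =>
          let tmp3 : List Int :=
            (PySem.List.slice a (some i) (some (i + 3))).foldl
              (fun tmp3 row => tmp3 ++ PySem.List.slice row (some j) (some (j + 3))) []
          let tmp3 := PySem.List.sorted tmp3 (fun x => x) false
          -- tmp3[4]: IndexError when the window has fewer than 5 cells, excluded by Pre_
          tmp2 ++ [PySem.List.pyGetD tmp3 4 0]) []
      tmp ++ [tmp2]) []
  let ans : Int := tmp.flatten.foldl (fun ans v => if T ≤ v then ans + 1 else ans) 0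
  PySem.Int.toStr ans

-- ===== PORT B =====
def solution_alt (R : Int) (C : Int) (a : List (List Int)) (T : Int) : String :=
  let ans : Int :=
    (PySem.List.pyRange 0 ((a.length : Int) - 2)).foldl (fun ans i =>
      (PySem.List.pyRange 0 (((a.headD []).length : Int) - 2)).foldl (fun ans j =>
        let cnt : Nat :=
          ((PySem.List.slice a (some i) (some (i + 3))).flatMap
            (fun row => PySem.List.slice row (some j) (some (j + 3)))).countP
              (fun x => T ≤ x)
        if 5 ≤ cnt then ans + 1 else ans) ans) 0
  PySem.Int.toStr ans

-- ===== PRECONDITION & SPEC =====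
-- Pre_ keeps the function's natural domain, a nonempty grid: A raises IndexError on a = []
-- (len(a[0])) and, when 3x3 windows exist, on ragged inputs whose windows have fewer than
-- 5 cells, while on ragged windows of 5..8 cells A's fixed index 4 is not the median; so
-- rows must be at least as wide as the first row whenever a window exists.
def Pre_solution (R : Int) (C : Int) (a : List (List Int)) (T : Int) : Prop :=
  a ≠ [] ∧ (3 ≤ a.length ∧ 3 ≤ (a.headD []).length →
    ∀ r ∈ a, (a.headD []).length ≤ r.length)
instance (R : Int) (C : Int) (a : List (List Int)) (T : Int) : Decidable (Pre_solution R C a T) := by unfold Pre_solution; infer_instance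
def pvWitness_solution : Int × Int × List (List Int) × Int :=
  (3, 3, [[1, 2, 3], [4, 5, 6], [7, 8, 9]], 5)

def Spec_solution (R : Int) (C : Int) (a : List (List Int)) (T : Int) (out : String) : Prop := out = solution_alt R C a T
instance (R : Int) (C : Int) (a : List (List Int)) (T : Int) (out : String) : Decidable (Spec_solution R C a T out) := by unfold Spec_solution; infer_instance

-- ===== CLAIM (what is proved, stated in full; the proofs are below) =====
def Claim_equal_solution : Prop := ∀ (R : Int) (C : Int) (a : List (List Int)) (T : Int), Dom_solution R C a T → Pre_solution R C a T → Spec_solution R C a T (solution R C a T)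

-- ===== LEMMAS AND PROOFS =====

-- In a nondecreasing list of 9 elements, the element at index 4 (Python's 5th smallest)
-- is ≥ T iff at least 5 elements are ≥ T.
theorem med_iff (t : List Int) (T : Int) (h9 : t.length = 9)
    (hs : t.Pairwise (· ≤ ·)) (h4 : 4 < t.length) :
    (T ≤ t[4]) ↔ 5 ≤ t.countP (fun x => T ≤ x) := by
  have hmono : ∀ i j (_ : i < t.length) (_ : j < t.length), i ≤ j → t[i] ≤ t[j] := by
    intro i j hi hj hij
    rcases Nat.lt_or_ge i j with h | h
    · exact List.pairwise_iff_getElem.mp hs i j hi hj h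
    · have : i = j := le_antisymm hij h
      subst this; exact le_refl _
  constructor
  · intro hT
    have hsplit : t = t.take 4 ++ t.drop 4 := (List.take_append_drop 4 t).symm
    have hdrop : (t.drop 4).countP (fun x => T ≤ x) = (t.drop 4).length := by
      apply List.countP_eq_length.mpr
      intro x hx
      rcases List.mem_iff_getElem.mp hx with ⟨k, hk, hkx⟩
      have hk' : 4 + k < t.length := by
        have := (List.length_drop (l := t) (i := 4)); omega
      have : x = t[4 + k] := by
        rw [← hkx]; simp [List.getElem_drop]
      subst this
      exact decide_eq_true (le_trans hT (hmono 4 (4 + k) h4 hk' (by omega)))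
    calc 5 = (t.drop 4).length := by simp [h9]
      _ = (t.drop 4).countP (fun x => T ≤ x) := hdrop.symm
      _ ≤ t.countP (fun x => T ≤ x) := by
          conv_rhs => rw [hsplit]
          rw [List.countP_append]; omega
  · intro h5
    by_contra hT
    push_neg at hT
    have htake : (t.take 5).countP (fun x => T ≤ x) = 0 := by
      apply List.countP_eq_zero.mpr
      intro x hx
      rcases List.mem_take_iff_getElem.mp hx with ⟨k, hk, hkx⟩
      have hk5 : k ≤ 4 := by omega
      have hk' : k < t.length := by omega
      have : t[k] ≤ t[4] := hmono k 4 hk' h4 hk5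
      subst hkx
      simp only [decide_eq_true_eq]
      omega
    have hsplit : t = t.take 5 ++ t.drop 5 := (List.take_append_drop 5 t).symm
    have hle : t.countP (fun x => T ≤ x) ≤ 4 := by
      conv_lhs => rw [hsplit]
      rw [List.countP_append, htake]
      have := List.countP_le_length (p := fun x : Int => decide (T ≤ x)) (l := t.drop 5)
      simp [h9] at this ⊢
      omega
    omega

-- The 3x3 window at (i, j), as A's extend loop and B's flatMap both build it.
def win (a : List (List Int)) (i j : Int) : List Int :=
  (PySem.List.slice a (some i) (some (i + 3))).flatMap
    (fun row => PySem.List.slice row (some j) (some (j + 3)))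

theorem win_length (a : List (List Int)) (i j : Int)
    (hi0 : 0 ≤ i) (hi : i + 3 ≤ (a.length : Int)) (hj0 : 0 ≤ j)
    (hw : ∀ r ∈ a, j.toNat + 3 ≤ r.length) :
    (win a i j).length = 9 := by
  unfold win
  rw [PySem.List.slice_toNat a hi0 (by omega)]
  have hi3 : (i + 3).toNat = i.toNat + 3 := by omega
  have hlen : (List.take ((i + 3).toNat - i.toNat) (List.drop i.toNat a)).length = 3 := by
    simp [List.length_take, List.length_drop]
    omega
  rw [List.length_flatMap]
  have hrow : ∀ r ∈ List.take ((i + 3).toNat - i.toNat) (List.drop i.toNat a),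
      (PySem.List.slice r (some j) (some (j + 3))).length = 3 := by
    intro r hr
    have hra : r ∈ a := List.mem_of_mem_drop (List.mem_of_mem_take hr)
    rw [PySem.List.slice_toNat r hj0 (by omega)]
    have := hw r hra
    simp [List.length_take, List.length_drop]
    omega
  rw [List.map_congr_left hrow]
  rw [List.map_const']
  simp [hlen]

-- A's per-window value: index 4 of the sorted window.
def medA (a : List (List Int)) (i j : Int) : Int :=
  PySem.List.pyGetD (PySem.List.sorted (win a i j) (fun x => x) false) 4 0

-- The pointwise bridge: median ≥ T iff at least 5 window cells are ≥ T.
theorem med_count (a : List (List Int)) (T i j : Int)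
    (h9 : (win a i j).length = 9) :
    (T ≤ medA a i j) ↔ 5 ≤ (win a i j).countP (fun x => T ≤ x) := by
  set s := PySem.List.sorted (win a i j) (fun x => x) false with hsdef
  have hperm : s.Perm (win a i j) := PySem.List.sorted_perm _ _ _
  have hlen : s.length = 9 := by rw [hperm.length_eq, h9]
  have h4 : 4 < s.length := by omega
  have hget : medA a i j = s[4] := by
    unfold medA
    rw [← hsdef]
    have : ((4 : Int)) = ((4 : Nat) : Int) := by norm_num
    rw [this, PySem.List.pyGetD_ofNat s 4 0 (by omega)]
  rw [hget, ← hperm.countP_eq]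
  exact med_iff s T hlen (PySem.List.sorted_pairwise _ _) h4

-- Prop-valued twin of PySem.List.foldl_count_if (the ports' ifs test a Prop).
theorem foldl_count_if' {α : Type} (p : α → Prop) [DecidablePred p] (l : List α) (a : Int) :
    l.foldl (fun acc x => if p x then acc + 1 else acc) a
      = a + (l.countP (fun x => decide (p x)) : Int) := by
  rw [← PySem.List.foldl_count_if (fun x => decide (p x)) l a]
  simp

-- ===== VERDICT (by name: the statement is the Claim_ definition above) =====
theorem solution_spec : Claim_equal_solution := by
  intro R C a T _hdom hpre
  obtain ⟨hne, hrect⟩ := hpre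
  unfold Spec_solution solution solution_alt
  simp only [PySem.List.foldl_append_singleton_eq_map, List.nil_append]
  simp only [PySem.List.foldl_append_eq_flatMap, List.nil_append]
  rw [foldl_count_if' (fun v => T ≤ v)]
  have hr : (a.length : Int) - 3 + 1 = (a.length : Int) - 2 := by ring
  have hw : ((a.headD []).length : Int) - 3 + 1 = ((a.headD []).length : Int) - 2 := by ring
  rw [hr, hw]
  simp only [foldl_count_if']
  rw [PySem.List.foldl_add]
  rw [List.countP_flatten, List.map_map, Nat.cast_list_sum, List.map_map]
  congr 1
  congr 1
  apply congrArg List.sum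
  apply List.map_congr_left
  intro i hi
  obtain ⟨hi0, hilt⟩ := PySem.List.mem_pyRange_one.mp hi
  simp only [Function.comp]
  rw [List.countP_map]
  apply congrArg
  apply List.countP_congr
  intro j hj
  obtain ⟨hj0, hjlt⟩ := PySem.List.mem_pyRange_one.mp hj
  have h9 : (win a i j).length = 9 := by
    apply win_length a i j hi0 (by omega) hj0
    intro r hr'
    have hwid := hrect ⟨by omega, by omega⟩ r hr'
    omega
  have hiff := med_count a T i j h9
  simp only [medA, win] at hiff
  simp only [Function.comp, decide_eq_true_eq]
  exact hiff
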